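-- pv_equiv track=rewrite | github.com/HWeber-tech/emp_proving_ground_v1 | mlops/train.py | _extract_layer_index
-- ===== SOURCE A (Python) =====
-- from typing import Dict, List, Optional, Tuple
--
-- def _extract_layer_index(parameter_name: str) -> Optional[int]:
--     marker = "_l"
--     if marker not in parameter_name:
--         return None
--     try:
--         suffix = parameter_name.split(marker, 1)[1]
--         digits = []
--         for char in suffix:
--             if char.isdigit():
--                 digits.append(char)
--             else:
--                 break
--         if not digits:
--             return None
--         return int("".join(digits))
--     except (IndexError, ValueError):
--         return None
-- ===== SOURCE B (Python) =====
-- import re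
--
-- def _extract_layer_index(parameter_name: str):
--     m = re.search(r"_l(\d*)", parameter_name)
--     if m is None:
--         return None
--     digits = m.group(1)
--     return int(digits) if digits else None
-- ===== Notes on version B (the rewrite author's own statement) =====
-- stated objective: idiomatic
-- what changed: Replaces the membership test + split + manual per-character digit loop with a single regex search r'_l(\d*)' whose group captures the digit run after the leftmost '_l'.
import Mathlib
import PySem

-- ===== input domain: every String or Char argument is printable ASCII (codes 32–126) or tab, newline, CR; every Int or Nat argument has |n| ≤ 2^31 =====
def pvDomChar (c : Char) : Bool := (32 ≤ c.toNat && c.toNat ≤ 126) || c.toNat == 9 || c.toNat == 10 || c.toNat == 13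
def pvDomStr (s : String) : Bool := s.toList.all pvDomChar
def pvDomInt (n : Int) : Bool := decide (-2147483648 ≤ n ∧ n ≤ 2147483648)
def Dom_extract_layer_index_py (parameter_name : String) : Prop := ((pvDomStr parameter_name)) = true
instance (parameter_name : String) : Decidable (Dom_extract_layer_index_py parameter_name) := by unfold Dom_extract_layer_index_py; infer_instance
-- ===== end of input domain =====

-- B replaces A's membership test + split + manual digit loop by a single regex-style
-- left-to-right search for '_l' capturing the digit run after it (idiomatic, same cost).

-- ===== PORT A =====
-- the for/break loop collecting leading digit characters of the suffix
def takeDigitsA : List Char → List Char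
  | [] => []
  | c :: cs => if PySem.Chars.isdigit c then c :: takeDigitsA cs else []

def extract_layer_index_py (parameter_name : String) : Option Int :=
  let marker : String := "_l"
  if ¬ PySem.Str.isIn marker parameter_name then none
  else
    match PySem.Str.splitMax? parameter_name marker 1 with
    | none => none            -- ValueError from split, caught by A's except
    | some parts =>
      match PySem.List.pyGet? parts 1 with
      | none => none          -- IndexError, caught by A's except
      | some suffix =>
        let digits := takeDigitsA suffix.toList
        if digits.isEmpty then none
        else PySem.Int.ofStr? (String.ofList digits)   -- ValueError would be caught → none

-- ===== PORT B =====
-- re.search(r"_l(\d*)", s): try to match at each position left to right; on the first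
-- match return the characters after '_l' (the \d* group is taken from them below).
def reSearchL : List Char → Option (List Char)
  | [] => none
  | c :: cs => if ['_', 'l'].isPrefixOf (c :: cs) then some cs.tail else reSearchL cs

def extract_layer_index_py_alt (parameter_name : String) : Option Int :=
  match reSearchL parameter_name.toList with
  | none => none
  | some rest =>
    let digits := rest.takeWhile PySem.Chars.isdigit   -- the (\d*) group; \d = [0-9], exact on the stated ASCII domain
    if digits.isEmpty then none else PySem.Int.ofChars? digits

-- ===== PRECONDITION & SPEC =====
def Spec_extract_layer_index_py (parameter_name : String) (out : Option Int) : Prop := out = extract_layer_index_py_alt parameter_name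
instance (parameter_name : String) (out : Option Int) : Decidable (Spec_extract_layer_index_py parameter_name out) := by unfold Spec_extract_layer_index_py; infer_instance

-- ===== CLAIM (what is proved, stated in full; the proofs are below) =====
def Claim_equal_extract_layer_index_py : Prop := ∀ (parameter_name : String), Dom_extract_layer_index_py parameter_name → Spec_extract_layer_index_py parameter_name (extract_layer_index_py parameter_name)

-- ===== LEMMAS AND PROOFS =====

lemma takeDigitsA_eq (cs : List Char) : takeDigitsA cs = cs.takeWhile PySem.Chars.isdigit := by
  induction cs with
  | nil => rfl
  | cons c cs ih => simp [takeDigitsA, List.takeWhile_cons, ih]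

lemma reSearchL_none_iff (cs : List Char) : reSearchL cs = none ↔ ¬ (['_', 'l'] <:+: cs) := by
  induction cs with
  | nil => simp [reSearchL]
  | cons c cs ih =>
    by_cases h : ['_', 'l'].isPrefixOf (c :: cs)
    · simp only [reSearchL, h, if_true]
      have hp : ['_', 'l'] <+: c :: cs := List.isPrefixOf_iff_prefix.mp h
      simp [List.IsPrefix.isInfix hp]
    · have h' : ¬ (['_', 'l'] <+: c :: cs) := fun hp => h (List.isPrefixOf_iff_prefix.mpr hp)
      simp only [reSearchL, h, Bool.false_eq_true, if_false]
      rw [ih, List.infix_cons_iff]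
      tauto

-- the m = 0 phase of splitOnMax.go returns immediately
lemma go_zero (fuel : Nat) (cs : List Char) (acc : List (List Char)) (h : 0 < fuel) :
    PySem.Chars.splitOnMax.go ['_', 'l'] fuel 0 cs [] acc = (cs :: acc).reverse := by
  obtain ⟨f, rfl⟩ := Nat.exists_eq_succ_of_ne_zero (Nat.pos_iff_ne_zero.mp h)
  cases cs <;> simp [PySem.Chars.splitOnMax.go]

-- the m = 1 phase: scan to the first "_l"; shape of the result in terms of reSearchL
lemma go_one (cs : List Char) : ∀ (fuel : Nat) (cur : List Char) (acc : List (List Char)),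
    cs.length < fuel →
    (match reSearchL cs with
     | some rest => ∃ pre, PySem.Chars.splitOnMax.go ['_', 'l'] fuel 1 cs cur acc
         = acc.reverse ++ [pre, rest]
     | none => ∃ pre, PySem.Chars.splitOnMax.go ['_', 'l'] fuel 1 cs cur acc
         = acc.reverse ++ [pre]) := by
  induction cs with
  | nil =>
    intro fuel cur acc h
    obtain ⟨f, rfl⟩ := Nat.exists_eq_succ_of_ne_zero (show fuel ≠ 0 by omega)
    simp [reSearchL, PySem.Chars.splitOnMax.go]
  | cons c cs ih =>
    intro fuel cur acc h
    obtain ⟨f, rfl⟩ := Nat.exists_eq_succ_of_ne_zero (show fuel ≠ 0 by omega)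
    have hl : cs.length < f := by simpa using h
    by_cases hp : ['_', 'l'].isPrefixOf (c :: cs)
    · have hdrop : (c :: cs).drop 2 = cs.tail := by cases cs <;> rfl
      simp only [reSearchL, hp, if_true]
      refine ⟨cur.reverse, ?_⟩
      have ht : cs.tail.length < f := Nat.lt_of_le_of_lt (by cases cs <;> simp) hl
      have hz := go_zero f cs.tail (cur.reverse :: acc) (by omega)
      simp [PySem.Chars.splitOnMax.go, hp, hdrop, hz]
    · have step : PySem.Chars.splitOnMax.go ['_', 'l'] (f + 1) 1 (c :: cs) cur acc
          = PySem.Chars.splitOnMax.go ['_', 'l'] f 1 cs (c :: cur) acc := by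
        simp [PySem.Chars.splitOnMax.go, hp]
      have hre : reSearchL (c :: cs) = reSearchL cs := by simp [reSearchL, hp]
      rw [hre, step]
      exact ih f (c :: cur) acc hl

-- ===== VERDICT (by name: the statement is the Claim_ definition above) =====
theorem extract_layer_index_py_spec : Claim_equal_extract_layer_index_py := by
  intro s _hdom
  unfold Spec_extract_layer_index_py extract_layer_index_py extract_layer_index_py_alt
  have hmem : PySem.Chars.isIn ['_', 'l'] s.toList = (reSearchL s.toList).isSome := by
    cases hre : reSearchL s.toList with
    | none =>
      simpa using (PySem.Chars.isIn_eq_false_iff ['_', 'l'] s.toList).mpr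
        ((reSearchL_none_iff _).mp hre)
    | some rest =>
      have hne : ¬ reSearchL s.toList = none := by simp [hre]
      rw [reSearchL_none_iff, not_not] at hne
      simpa using (PySem.Chars.isIn_iff_infix ['_', 'l'] s.toList).mpr hne
  cases hre : reSearchL s.toList with
  | none => simp [hmem, hre]
  | some rest =>
    have hgo := go_one s.toList (s.toList.length + 1) [] [] (Nat.lt_succ_self _)
    rw [hre] at hgo
    obtain ⟨pre, hpre⟩ := hgo
    have hSOM : PySem.Chars.splitOnMax s.toList ['_', 'l'] 1 = [pre, rest] := by
      rw [PySem.Chars.splitOnMax]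
      simpa using hpre
    simp [hmem, hre, PySem.Str.splitMax?, PySem.Chars.splitMax?, hSOM,
      PySem.List.pyGet?, PySem.List.pyIdx?, takeDigitsA_eq, PySem.Int.ofStr?]
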